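-- pv_equiv track=rewrite | github.com/ap4509-columbia/NYP | src/mc_base_viz.py | _seed_summary
-- ===== SOURCE A (Python) =====
-- from typing import Callable, Dict, List, Optional, Tuple
--
-- def _seed_summary(seeds) -> Tuple[int, str]:
--     """Return (n_seeds, 'seeds X–Y') for use in titles and footers. Nothing hardcoded."""
--     try:
--         seeds_sorted = sorted({int(s) for s in seeds if s is not None})
--     except (TypeError, ValueError):
--         seeds_sorted = []
--     n = len(seeds_sorted)
--     rng = f"seeds {seeds_sorted[0]}–{seeds_sorted[-1]}" if seeds_sorted else ""
--     return n, rng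
-- ===== SOURCE B (Python) =====
-- def _seed_summary(seeds):
--     """Return (n_seeds, 'seeds X–Y') without sorting: distinct count + min/max scan."""
--     try:
--         s = {int(x) for x in seeds if x is not None}
--     except (TypeError, ValueError):
--         s = set()
--     n = len(s)
--     rng = f"seeds {min(s)}–{max(s)}" if s else ""
--     return n, rng
-- ===== Notes on version B (the rewrite author's own statement) =====
-- stated objective: simpler
-- what changed: B builds the same distinct set but replaces A's sort-then-index-first/last strategy with len plus direct min/max scans, never materialising a sorted list.
import Mathlib
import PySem

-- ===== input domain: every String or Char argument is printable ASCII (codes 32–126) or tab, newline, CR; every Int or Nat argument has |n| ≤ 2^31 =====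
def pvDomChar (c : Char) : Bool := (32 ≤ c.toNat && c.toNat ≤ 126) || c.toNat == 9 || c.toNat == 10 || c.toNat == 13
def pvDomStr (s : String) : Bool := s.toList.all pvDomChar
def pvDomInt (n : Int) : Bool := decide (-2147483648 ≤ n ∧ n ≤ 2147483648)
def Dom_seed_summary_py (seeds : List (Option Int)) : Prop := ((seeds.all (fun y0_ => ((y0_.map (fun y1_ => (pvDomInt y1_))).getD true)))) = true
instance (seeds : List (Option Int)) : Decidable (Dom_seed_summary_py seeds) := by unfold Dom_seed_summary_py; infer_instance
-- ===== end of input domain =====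

-- B drops A's sort: same distinct set, but len plus direct min/max scans (objective: simpler).

-- ===== PORT A =====
-- sorted({int(s) for s in seeds if s is not None}); the try/except never fires for Option Int inputs.
def seed_summary_py (seeds : List (Option Int)) : Int × String :=
  let seeds_sorted := PySem.List.sorted (PySem.Set.ofList (seeds.filterMap id)) (fun x => x) false
  let n : Int := seeds_sorted.length
  let rng : String :=
    if seeds_sorted ≠ [] then
      "seeds " ++ PySem.Int.toStr (PySem.List.pyGetD seeds_sorted 0 0) ++ "–" ++
        PySem.Int.toStr (PySem.List.pyGetD seeds_sorted (-1) 0)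
    else ""
  (n, rng)

-- ===== PORT B =====
def seed_summary_py_alt (seeds : List (Option Int)) : Int × String :=
  let s : PySem.Set Int := PySem.Set.ofList (seeds.filterMap id)
  let n : Int := PySem.Set.len s
  let rng : String :=
    match PySem.List.min? s (fun x => x), PySem.List.max? s (fun x => x) with
    | some lo, some hi => "seeds " ++ PySem.Int.toStr lo ++ "–" ++ PySem.Int.toStr hi
    | _, _ => ""
  (n, rng)

-- ===== PRECONDITION & SPEC =====
def Spec_seed_summary_py (seeds : List (Option Int)) (out : Int × String) : Prop := out = seed_summary_py_alt seeds
instance (seeds : List (Option Int)) (out : Int × String) : Decidable (Spec_seed_summary_py seeds out) := by unfold Spec_seed_summary_py; infer_instance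

-- ===== CLAIM (what is proved, stated in full; the proofs are below) =====
def Claim_equal_seed_summary_py : Prop := ∀ (seeds : List (Option Int)), Dom_seed_summary_py seeds → Spec_seed_summary_py seeds (seed_summary_py seeds)

-- ===== LEMMAS AND PROOFS =====

-- head of sorted(set) is min? of the set, and its last element is max?.
theorem min_max_of_sorted_cons (s : List Int) (a : Int) (t : List Int)
    (h : PySem.List.sorted s (fun x => x) false = a :: t) :
    PySem.List.min? s (fun x => x) = some a ∧
    PySem.List.max? s (fun x => x) = some ((a :: t).getLast (by simp)) := by
  have hmem : a ∈ s := by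
    have := (PySem.List.mem_sorted s (fun x => x) false a)
    rw [h] at this; exact this.mp (by simp)
  have hamin : ∀ y ∈ s, a ≤ y :=
    PySem.List.key_head_sorted_le s (fun x => x) h
  have hlmem : ((a :: t).getLast (by simp)) ∈ s := by
    have hmem2 : ((a :: t).getLast (by simp)) ∈ PySem.List.sorted s (fun x => x) false := by
      rw [h]; exact List.getLast_mem _
    exact (PySem.List.mem_sorted s (fun x => x) false _).mp hmem2
  have hlmax : ∀ y ∈ s, y ≤ ((a :: t).getLast (by simp)) := by
    intro y hy
    have hy' : y ∈ PySem.List.sorted s (fun x => x) false := (PySem.List.mem_sorted s (fun x => x) false y).mpr hy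
    rw [h] at hy'
    obtain ⟨p, hp, hyp⟩ := List.mem_iff_getElem.mp hy'
    have hlast : ((a :: t).getLast (by simp)) = (a :: t)[(a :: t).length - 1] := by
      rw [List.getLast_eq_getElem]
    rw [hlast, ← hyp]
    have := PySem.List.key_sorted_getElem_mono (xs := s) (key := fun x => x)
      (p := p) (q := (a :: t).length - 1)
      (by omega) (by rw [h]; omega)
    simpa [h] using this
  obtain ⟨m, hm⟩ : ∃ m, PySem.List.min? s (fun x => x) = some m := by
    cases hmn : PySem.List.min? s (fun x => x) with
    | none =>
        have : s = [] := (PySem.List.min?_eq_none_iff ..).mp hmn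
        rw [this] at hmem; cases hmem
    | some m => exact ⟨m, rfl⟩
  obtain ⟨M, hM⟩ : ∃ M, PySem.List.max? s (fun x => x) = some M := by
    cases hmx : PySem.List.max? s (fun x => x) with
    | none =>
        have : s = [] := (PySem.List.max?_eq_none_iff ..).mp hmx
        rw [this] at hmem; cases hmem
    | some M => exact ⟨M, rfl⟩
  have hmeq : m = a :=
    le_antisymm (PySem.List.min?_isMin hm a hmem) (hamin m (PySem.List.min?_mem hm))
  have hMeq : M = (a :: t).getLast (by simp) :=
    le_antisymm (hlmax M (PySem.List.max?_mem hM)) (PySem.List.max?_isMax hM _ hlmem)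
  exact ⟨by rw [hm, hmeq], by rw [hM, hMeq]⟩

-- ===== VERDICT (by name: the statement is the Claim_ definition above) =====
theorem seed_summary_py_spec : Claim_equal_seed_summary_py := by
  intro seeds _
  unfold Spec_seed_summary_py seed_summary_py seed_summary_py_alt
  set s := PySem.Set.ofList (seeds.filterMap id) with hs
  cases h : PySem.List.sorted s (fun x => x) false with
  | nil =>
      have hnil : s = [] := (PySem.List.sorted_eq_nil_iff ..).mp h
      simp [hnil, PySem.Set.len, PySem.List.min?, PySem.List.max?]
  | cons a t =>
      obtain ⟨h1, h2⟩ := min_max_of_sorted_cons s a t h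
      have hlen : s.length = (a :: t).length := by
        rw [← h]; exact (PySem.List.length_sorted ..).symm
      have hget : PySem.List.pyGetD (a :: t) (-1) 0 = (a :: t).getLast (by simp) :=
        PySem.List.pyGetD_neg_one (xs := a :: t) 0 (by simp)
      simp [h1, h2, PySem.Set.len, hlen, PySem.List.pyGetD_zero_cons, hget]
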